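-- pv_equiv track=rewrite | github.com/vcamp314/src-code-mapper | mapsrc/pumlify/pumlify.py | generate_puml_initialization
-- ===== SOURCE A (Python) =====
-- def generate_puml_initialization(group_name: str, group_key: str, grouping_map: dict, indent: str) -> str:
--     (key, subgroups, entities) = grouping_map.get(group_key, (group_key, [], []))
--     if not subgroups and not entities:
--         return ''
--
--     puml_str = '\n'
--     puml_str += indent + 'namespace ' + pumlify_text(group_name) + ' {\n'
--     new_indent = indent + '    '
--     for entity in entities:
--         # todo: remove extension rsplitting and add this logic to when grouping_map is first created in scan
--         entity_name = pumlify_text(entity.rsplit('.', 1)[0])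
--         puml_str += new_indent + f'class {entity_name}\n'
--
--     for subgroup_name in subgroups:
--         subgroup_key = group_key + '/' + subgroup_name
--         resolved_name = resolve_duplicates(subgroup_name, entities)
--         puml_str += generate_puml_initialization(resolved_name, subgroup_key, grouping_map, new_indent)
--
--     puml_str += indent + '}\n'
--     return puml_str
--
-- def pumlify_text(txt: str) -> str:
--     return txt.replace('-', '_')
--
-- def resolve_duplicates(subgroup_name: str, entities: list) -> str:
--     for entity in entities:
--         # todo: remove extension rsplitting and add this logic to when grouping_map is first created in scan
--         if subgroup_name == entity.rsplit('.', 1)[0]: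
--             return subgroup_name + '_'
--
--     return subgroup_name
-- ===== SOURCE B (Python) =====
-- def generate_puml_initialization(group_name: str, group_key: str, grouping_map: dict, indent: str) -> str:
--     # Iterative pre-order traversal with an explicit worklist instead of recursion.
--     # Stack items: ('open', name, key, indent) to expand a node, ('close', indent) to emit '}'.
--     out = []
--     stack = [('open', group_name, group_key, indent)]
--     while stack:
--         item = stack.pop()
--         if item[0] == 'close':
--             out.append(item[1] + '}\n')
--             continue
--         _, name, key, ind = item
--         _k, subgroups, entities = grouping_map.get(key, (key, [], []))
--         if not subgroups and not entities:
--             continue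
--         out.append('\n' + ind + 'namespace ' + name.replace('-', '_') + ' {\n')
--         new_indent = ind + '    '
--         stems = [e.rsplit('.', 1)[0] for e in entities]
--         for s in stems:
--             out.append(new_indent + 'class ' + s.replace('-', '_') + '\n')
--         stack.append(('close', ind))
--         for sub in reversed(subgroups):
--             resolved = sub + '_' if sub in stems else sub
--             stack.append(('open', resolved, key + '/' + sub, new_indent))
--     return ''.join(out)
-- ===== Notes on version B (the rewrite author's own statement) =====
-- stated objective: alternative
-- what changed: A's direct recursion over the grouping tree is replaced by an iterative pre-order traversal driven by an explicit worklist stack of open-node/close-brace items, collecting output pieces in a buffer joined at the end.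
import Mathlib
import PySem

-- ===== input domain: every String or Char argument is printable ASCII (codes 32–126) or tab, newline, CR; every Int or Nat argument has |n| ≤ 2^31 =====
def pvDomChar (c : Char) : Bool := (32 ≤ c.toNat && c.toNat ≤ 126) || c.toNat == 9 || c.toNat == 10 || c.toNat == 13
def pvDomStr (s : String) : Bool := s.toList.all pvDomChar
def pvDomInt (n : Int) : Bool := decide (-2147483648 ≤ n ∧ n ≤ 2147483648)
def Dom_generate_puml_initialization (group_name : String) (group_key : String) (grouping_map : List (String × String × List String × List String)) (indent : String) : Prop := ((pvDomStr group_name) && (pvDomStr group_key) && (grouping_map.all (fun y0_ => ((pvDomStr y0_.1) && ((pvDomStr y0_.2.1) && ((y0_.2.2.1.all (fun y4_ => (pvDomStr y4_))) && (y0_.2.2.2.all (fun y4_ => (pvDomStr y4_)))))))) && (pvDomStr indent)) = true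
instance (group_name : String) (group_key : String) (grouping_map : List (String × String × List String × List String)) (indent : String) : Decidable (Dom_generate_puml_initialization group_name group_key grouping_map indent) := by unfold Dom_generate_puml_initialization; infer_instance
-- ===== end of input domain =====

-- B replaces A's direct recursion by an iterative pre-order traversal over an explicit
-- worklist stack of open/close items (same output string; objective: alternative decomposition).

-- ===== PORT A =====
-- txt.replace('-', '_')
def pumlifyText (txt : String) : String := PySem.Str.replace txt "-" "_"

-- s.rsplit('.', 1)[0]: everything before the LAST '.', or s itself when there is no '.'.
-- (no PySem primitive for rsplit; exact by construction on all strings)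
def pyStem (s : String) : String :=
  if '.' ∈ s.toList then String.ofList (((s.toList.reverse.dropWhile (· ≠ '.')).drop 1).reverse)
  else s

-- grouping_map.get(group_key, (group_key, [], [])): first match in the association list
def dictGet3 (m : List (String × String × List String × List String)) (k : String) :
    String × List String × List String :=
  match m with
  | [] => (k, [], [])
  | (k', v) :: rest => if k' == k then v else dictGet3 rest k

def resolveDuplicates (subgroupName : String) (entities : List String) : String :=
  match entities with
  | [] => subgroupName
  | e :: rest =>
    if subgroupName == pyStem e then subgroupName ++ "_" else resolveDuplicates subgroupName rest

-- fuel bound shared by both ports: recursion/worklist depth never exceeds (longest map key) + 2,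
-- because each level's key grows by at least one character and only map keys are ever found
def maxKeyLen (m : List (String × String × List String × List String)) : Nat :=
  (m.map (fun e => e.1.toList.length)).foldr max 0

def pumlRec : Nat → String → String → List (String × String × List String × List String) → String → String
  | 0, _, _, _, _ => ""
  | Nat.succ f, group_name, group_key, grouping_map, indent =>
    let t := dictGet3 grouping_map group_key
    let subgroups := t.2.1
    let entities := t.2.2
    if subgroups.isEmpty && entities.isEmpty then ""
    else
      let s1 := "\n" ++ indent ++ "namespace " ++ pumlifyText group_name ++ " {\n"
      let newIndent := indent ++ "    "
      let s2 := entities.foldl (fun acc e => acc ++ (newIndent ++ "class " ++ pumlifyText (pyStem e) ++ "\n")) s1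
      let s3 := subgroups.foldl
        (fun acc sub => acc ++ pumlRec f (resolveDuplicates sub entities) (group_key ++ "/" ++ sub) grouping_map newIndent) s2
      s3 ++ (indent ++ "}\n")

def generate_puml_initialization (group_name : String) (group_key : String) (grouping_map : List (String × String × List String × List String)) (indent : String) : String :=
  pumlRec (maxKeyLen grouping_map + 2) group_name group_key grouping_map indent

-- ===== PORT B =====
-- worklist item: open a node (with its remaining depth fuel), or emit a closing brace
inductive PumlItem
  | open_ (fuel : Nat) (name : String) (key : String) (ind : String)
  | close (ind : String)
deriving Repr, DecidableEq

def maxSubs (m : List (String × String × List String × List String)) : Nat :=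
  (m.map (fun e => e.2.2.1.length)).foldr max 0

def itemWeight (S : Nat) : PumlItem → Nat
  | .close _ => 1
  | .open_ f _ _ _ => (S + 2) ^ (f + 1)

def stackWeight (S : Nat) (st : List PumlItem) : Nat := (st.map (itemWeight S)).sum

-- lemmas the loop's termination proof cites
lemma dictGet3_subs_le (m : List (String × String × List String × List String)) (k : String) :
    (dictGet3 m k).2.1.length ≤ maxSubs m := by
  induction m with
  | nil => simp [dictGet3]
  | cons p rest ih =>
    obtain ⟨k', v⟩ := p
    simp only [dictGet3, maxSubs, List.map_cons, List.foldr_cons]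
    split
    · exact Nat.le_max_left _ _
    · exact le_trans ih (Nat.le_max_right _ _)

lemma push_reverse {α : Type} (g : α → PumlItem) :
    ∀ (l : List α) (st : List PumlItem),
      l.reverse.foldl (fun s x => g x :: s) st = l.map g ++ st := by
  intro l
  induction l with
  | nil => intro st; simp
  | cons a l ih =>
    intro st
    simp only [List.reverse_cons, List.foldl_append, List.foldl_cons, List.foldl_nil, ih,
      List.map_cons, List.cons_append]

lemma stackWeight_cons (S : Nat) (it : PumlItem) (rest : List PumlItem) :
    stackWeight S (it :: rest) = itemWeight S it + stackWeight S rest := by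
  simp [stackWeight]

lemma itemWeight_pos (S : Nat) (it : PumlItem) : 0 < itemWeight S it := by
  cases it with
  | close _ => simp [itemWeight]
  | open_ f _ _ _ => exact pow_pos (by omega) _

lemma stackWeight_lt_cons (S : Nat) (it : PumlItem) (rest : List PumlItem) :
    stackWeight S rest < stackWeight S (it :: rest) := by
  rw [stackWeight_cons]
  have := itemWeight_pos S it
  omega

def pumlLoop (m : List (String × String × List String × List String)) :
    List PumlItem → String → String
  | [], acc => acc
  | .close ind :: rest, acc => pumlLoop m rest (acc ++ (ind ++ "}\n"))
  | .open_ 0 _ _ _ :: rest, acc => pumlLoop m rest acc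
  | .open_ (f + 1) name key ind :: rest, acc =>
    let t := dictGet3 m key
    let subgroups := t.2.1
    let entities := t.2.2
    if subgroups.isEmpty && entities.isEmpty then pumlLoop m rest acc
    else
      let newIndent := ind ++ "    "
      let stems := entities.map pyStem
      let header := "\n" ++ ind ++ "namespace " ++ pumlifyText name ++ " {\n"
      let classes := stems.foldl (fun a s => a ++ (newIndent ++ "class " ++ pumlifyText s ++ "\n")) ""
      let stack' := subgroups.reverse.foldl
        (fun st sub =>
          PumlItem.open_ f (if sub ∈ stems then sub ++ "_" else sub) (key ++ "/" ++ sub) newIndent :: st)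
        (PumlItem.close ind :: rest)
      pumlLoop m stack' (acc ++ (header ++ classes))
termination_by st _ => stackWeight (maxSubs m) st
decreasing_by
  · exact stackWeight_lt_cons _ _ _
  · exact stackWeight_lt_cons _ _ _
  · exact stackWeight_lt_cons _ _ _
  · rw [push_reverse]
    have hsubs := dictGet3_subs_le m key
    have hX : 0 < (maxSubs m + 2) ^ f * (maxSubs m + 2) := by positivity
    simp only [stackWeight, List.map_append, List.sum_append, List.map_map, List.map_cons,
      List.sum_cons, Function.comp_def, itemWeight, List.map_const', List.sum_replicate,
      smul_eq_mul, pow_succ]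
    have h1 : (dictGet3 m key).2.1.length * ((maxSubs m + 2) ^ f * (maxSubs m + 2)) ≤
        maxSubs m * ((maxSubs m + 2) ^ f * (maxSubs m + 2)) := Nat.mul_le_mul_right _ hsubs
    nlinarith [h1, hX]

def generate_puml_initialization_alt (group_name : String) (group_key : String) (grouping_map : List (String × String × List String × List String)) (indent : String) : String :=
  pumlLoop grouping_map [PumlItem.open_ (maxKeyLen grouping_map + 2) group_name group_key indent] ""

-- ===== PRECONDITION & SPEC =====
def Spec_generate_puml_initialization (group_name : String) (group_key : String) (grouping_map : List (String × String × List String × List String)) (indent : String) (out : String) : Prop := out = generate_puml_initialization_alt group_name group_key grouping_map indent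
instance (group_name : String) (group_key : String) (grouping_map : List (String × String × List String × List String)) (indent : String) (out : String) : Decidable (Spec_generate_puml_initialization group_name group_key grouping_map indent out) := by unfold Spec_generate_puml_initialization; infer_instance

-- ===== CLAIM (what is proved, stated in full; the proofs are below) =====
def Claim_equal_generate_puml_initialization : Prop := ∀ (group_name : String) (group_key : String) (grouping_map : List (String × String × List String × List String)) (indent : String), Dom_generate_puml_initialization group_name group_key grouping_map indent → Spec_generate_puml_initialization group_name group_key grouping_map indent (generate_puml_initialization group_name group_key grouping_map indent)

-- ===== LEMMAS AND PROOFS =====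

lemma foldl_append_pull {α : Type} (h : α → String) :
    ∀ (l : List α) (p q : String),
      l.foldl (fun a x => a ++ h x) (p ++ q) = p ++ l.foldl (fun a x => a ++ h x) q := by
  intro l
  induction l with
  | nil => intro p q; simp
  | cons a l ih =>
    intro p q
    simp only [List.foldl_cons, String.append_assoc, ih]

lemma foldl_append_eq {α : Type} (h : α → String) (l : List α) (init : String) :
    l.foldl (fun a x => a ++ h x) init = init ++ l.foldl (fun a x => a ++ h x) "" := by
  have := foldl_append_pull h l init ""
  rwa [String.append_empty] at this

lemma resolve_eq (ents : List String) (sub : String) :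
    resolveDuplicates sub ents = if sub ∈ ents.map pyStem then sub ++ "_" else sub := by
  induction ents with
  | nil => simp [resolveDuplicates]
  | cons e rest ih =>
    simp only [resolveDuplicates, List.map_cons, List.mem_cons, ih]
    by_cases h : sub = pyStem e
    · simp [h]
    · simp [h, beq_iff_eq]

lemma opens_drain (m : List (String × String × List String × List String)) (f : Nat)
    (nm kk : String → String) (newInd : String)
    (ih : ∀ (n k i : String) (rest : List PumlItem) (acc : String),
      pumlLoop m (PumlItem.open_ f n k i :: rest) acc = pumlLoop m rest (acc ++ pumlRec f n k m i)) :
    ∀ (subs : List String) (tail : List PumlItem) (acc : String),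
      pumlLoop m (subs.map (fun sub => PumlItem.open_ f (nm sub) (kk sub) newInd) ++ tail) acc
        = pumlLoop m tail (subs.foldl (fun a sub => a ++ pumlRec f (nm sub) (kk sub) m newInd) acc) := by
  intro subs
  induction subs with
  | nil => intro tail acc; simp
  | cons a l ihl =>
    intro tail acc
    simp only [List.map_cons, List.cons_append, List.foldl_cons, ih, ihl]

lemma loop_close (m : List (String × String × List String × List String))
    (ind : String) (rest : List PumlItem) (acc : String) :
    pumlLoop m (PumlItem.close ind :: rest) acc = pumlLoop m rest (acc ++ (ind ++ "}\n")) := by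
  rw [pumlLoop]

lemma loop_open (m : List (String × String × List String × List String)) :
    ∀ (f : Nat) (name key ind : String) (rest : List PumlItem) (acc : String),
      pumlLoop m (PumlItem.open_ f name key ind :: rest) acc
        = pumlLoop m rest (acc ++ pumlRec f name key m ind) := by
  intro f
  induction f with
  | zero =>
    intro n k i rest acc
    rw [pumlLoop]
    simp [pumlRec]
  | succ f ih =>
    intro n k i rest acc
    rw [pumlLoop]
    simp only [pumlRec]
    by_cases h : ((dictGet3 m k).2.1.isEmpty && (dictGet3 m k).2.2.isEmpty) = true
    · simp [h]
    · simp only [h, if_neg, Bool.not_eq_true]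
      rw [push_reverse, opens_drain m f _ _ _ ih]
      rw [loop_close]
      apply congrArg (pumlLoop m rest)
      simp only [resolve_eq, List.foldl_map]
      rw [foldl_append_eq (fun y => i ++ "    " ++ "class " ++ pumlifyText (pyStem y) ++ "\n")
        (dictGet3 m k).2.2 ("\n" ++ i ++ "namespace " ++ pumlifyText n ++ " {\n")]
      rw [foldl_append_pull
        (fun sub => pumlRec f (if sub ∈ List.map pyStem (dictGet3 m k).2.2 then sub ++ "_" else sub)
          (k ++ "/" ++ sub) m (i ++ "    "))
        (dictGet3 m k).2.1 acc
        ("\n" ++ i ++ "namespace " ++ pumlifyText n ++ " {\n" ++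
          List.foldl (fun x y => x ++ (i ++ "    " ++ "class " ++ pumlifyText (pyStem y) ++ "\n")) ""
            (dictGet3 m k).2.2)]
      simp [String.append_assoc]

-- ===== VERDICT (by name: the statement is the Claim_ definition above) =====
theorem generate_puml_initialization_spec : Claim_equal_generate_puml_initialization := by
  intro gn gk gm ind _
  unfold Spec_generate_puml_initialization generate_puml_initialization generate_puml_initialization_alt
  rw [loop_open]
  simp [pumlLoop]
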